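-- pv_equiv track=rewrite | github.com/Asim-2000/HackerRank-Solutions | King.py | multiply_clock_wise_rot
-- ===== SOURCE A (Python) =====
-- def multiply_clock_wise_rot(x, y, k, a):
--     return [[
--         a[0][i] + (x - y) * a[1][i] + (k + x + y) * a[2][i]
--         for i in range(3)
--     ], [
--         -a[2][i]
--         for i in range(3)
--     ], [
--         a[1][i]
--         for i in range(3)
--     ]]
-- ===== SOURCE B (Python) =====
-- def multiply_clock_wise_rot(x, y, k, a):
--     M = [[1, x - y, k + x + y], [0, 0, -1], [0, 1, 0]]
--     return [[sum(M[r][j] * a[j][c] for j in range(3)) for c in range(3)]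
--             for r in range(3)]
-- ===== Notes on version B (the rewrite author's own statement) =====
-- stated objective: alternative
-- what changed: B builds the explicit 3x3 transform matrix M = [[1, x-y, k+x+y],[0,0,-1],[0,1,0]] and computes the result by a uniform triple-nested matrix multiplication M @ a, instead of A's three hardcoded per-row comprehensions.
import Mathlib
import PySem

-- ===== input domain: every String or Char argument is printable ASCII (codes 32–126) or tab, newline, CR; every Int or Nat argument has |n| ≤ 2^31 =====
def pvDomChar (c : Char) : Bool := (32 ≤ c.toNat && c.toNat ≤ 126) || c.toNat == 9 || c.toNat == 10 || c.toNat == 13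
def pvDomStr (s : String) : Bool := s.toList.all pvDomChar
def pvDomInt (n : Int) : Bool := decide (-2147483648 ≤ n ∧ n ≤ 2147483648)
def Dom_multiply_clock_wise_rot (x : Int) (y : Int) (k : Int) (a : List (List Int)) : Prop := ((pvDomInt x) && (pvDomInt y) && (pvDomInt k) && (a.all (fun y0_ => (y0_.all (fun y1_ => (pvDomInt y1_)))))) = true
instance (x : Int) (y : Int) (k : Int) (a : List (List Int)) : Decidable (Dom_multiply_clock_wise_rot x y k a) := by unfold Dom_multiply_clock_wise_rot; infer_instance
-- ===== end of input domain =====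

-- B replaces A's three hardcoded row comprehensions by an explicit 3x3 transform matrix
-- multiplied against a with a uniform triple-nested loop (alternative decomposition, same cost).

-- ===== PORT A =====
-- a[r][i] under Pre_ (all indices in range); pyGetD is exact there
def multiply_clock_wise_rot (x : Int) (y : Int) (k : Int) (a : List (List Int)) : List (List Int) :=
  [ (PySem.List.pyRange 0 3 1).map (fun i =>
      PySem.List.pyGetD (PySem.List.pyGetD a 0 []) i 0
        + (x - y) * PySem.List.pyGetD (PySem.List.pyGetD a 1 []) i 0
        + (k + x + y) * PySem.List.pyGetD (PySem.List.pyGetD a 2 []) i 0)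
  , (PySem.List.pyRange 0 3 1).map (fun i =>
      -(PySem.List.pyGetD (PySem.List.pyGetD a 2 []) i 0))
  , (PySem.List.pyRange 0 3 1).map (fun i =>
      PySem.List.pyGetD (PySem.List.pyGetD a 1 []) i 0) ]

-- ===== PORT B =====
def multiply_clock_wise_rot_alt (x : Int) (y : Int) (k : Int) (a : List (List Int)) : List (List Int) :=
  let M : List (List Int) := [[1, x - y, k + x + y], [0, 0, -1], [0, 1, 0]]
  (PySem.List.pyRange 0 3 1).map (fun r =>
    (PySem.List.pyRange 0 3 1).map (fun c =>
      (PySem.List.pyRange 0 3 1).foldl (fun s j =>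
        s + PySem.List.pyGetD (PySem.List.pyGetD M r []) j 0
              * PySem.List.pyGetD (PySem.List.pyGetD a j []) c 0) 0))

-- ===== PRECONDITION & SPEC =====
-- Pre_: A raises IndexError unless a has at least 3 rows and each of the first 3 rows has at least 3 entries.
def Pre_multiply_clock_wise_rot (x : Int) (y : Int) (k : Int) (a : List (List Int)) : Prop :=
  3 ≤ a.length ∧ (a.take 3).all (fun r => decide (3 ≤ r.length)) = true
instance (x : Int) (y : Int) (k : Int) (a : List (List Int)) : Decidable (Pre_multiply_clock_wise_rot x y k a) := by unfold Pre_multiply_clock_wise_rot; infer_instance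
def pvWitness_multiply_clock_wise_rot : Int × Int × Int × List (List Int) :=
  (1, 2, 3, [[1, 2, 3], [4, 5, 6], [7, 8, 9]])

def Spec_multiply_clock_wise_rot (x : Int) (y : Int) (k : Int) (a : List (List Int)) (out : List (List Int)) : Prop := out = multiply_clock_wise_rot_alt x y k a
instance (x : Int) (y : Int) (k : Int) (a : List (List Int)) (out : List (List Int)) : Decidable (Spec_multiply_clock_wise_rot x y k a out) := by unfold Spec_multiply_clock_wise_rot; infer_instance

-- ===== CLAIM (what is proved, stated in full; the proofs are below) =====
def Claim_equal_multiply_clock_wise_rot : Prop := ∀ (x : Int) (y : Int) (k : Int) (a : List (List Int)), Dom_multiply_clock_wise_rot x y k a → Pre_multiply_clock_wise_rot x y k a → Spec_multiply_clock_wise_rot x y k a (multiply_clock_wise_rot x y k a)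

-- ===== LEMMAS AND PROOFS =====
theorem pvG0 {α : Type} (a : α) (l : List α) (d : α) : PySem.List.pyGetD (a :: l) 0 d = a := by
  simp [PySem.List.pyGetD, PySem.List.pyGet?, PySem.List.pyIdx?]

theorem pvG1 {α : Type} (a b : α) (l : List α) (d : α) : PySem.List.pyGetD (a :: b :: l) 1 d = b := by
  simp [PySem.List.pyGetD, PySem.List.pyGet?, PySem.List.pyIdx?]

theorem pvG2 {α : Type} (a b c : α) (l : List α) (d : α) : PySem.List.pyGetD (a :: b :: c :: l) 2 d = c := by
  have h2 : (2:Int) ≤ (l.length:Int) + 1 + 1 := by omega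
  simp [PySem.List.pyGetD, PySem.List.pyGet?, PySem.List.pyIdx?, h2]

theorem pvRange3 : PySem.List.pyRange 0 3 1 = [0, 1, 2] := by decide

-- ===== VERDICT (by name: the statement is the Claim_ definition above) =====
theorem multiply_clock_wise_rot_spec : Claim_equal_multiply_clock_wise_rot := by
  intro x y k a _hdom hpre
  obtain ⟨hlen, hrows⟩ := hpre
  match a with
  | [] => simp at hlen
  | [_] => simp at hlen
  | [_, _] => simp at hlen
  | r0 :: r1 :: r2 :: rest =>
    simp only [List.take, List.all_cons, Bool.and_eq_true, decide_eq_true_eq, List.all_nil] at hrows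
    obtain ⟨h0, h1, h2, -⟩ := hrows
    match r0, h0 with
    | a00 :: a01 :: a02 :: _, _ =>
    match r1, h1 with
    | a10 :: a11 :: a12 :: _, _ =>
    match r2, h2 with
    | a20 :: a21 :: a22 :: _, _ =>
      show _ = _
      simp only [multiply_clock_wise_rot, multiply_clock_wise_rot_alt, pvRange3,
        List.map_cons, List.map_nil, List.foldl_cons, List.foldl_nil,
        pvG0, pvG1, pvG2]
      norm_num
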